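-- pv_equiv track=rewrite | github.com/DiamondLightSource/aa-remove-data | src/aa_remove_data/remove_data.py | remove_every_nth
-- ===== SOURCE A (Python) =====
-- def remove_every_nth(
--     samples: list, n: int, block_size: int = 1, initial: int = 0
-- ) -> list:
--     """Reduce the size of a list of samples by removing every nth sample. The
--     samples can be grouped together into blocks, so that every nth block is
--     removed.
--
--     Args:
--         samples (list): List of samples
--         n (int): Every nth sample (or block of samples) will be removed.
--         block_size (int, optional): Number of samples per block. Defaults to 1.
--         initial (int, optional): End point of processing from a previous chunk.
--
--     Returns:
--         list: Reduced list of samples.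
--     """
--     if n <= 0:
--         raise ValueError(f"n = {n}, must be >= 1")
--     elif block_size <= 0:
--         raise ValueError(f"block_size = {block_size}, must be >= 1")
--     return [
--         item
--         for i, item in enumerate(samples)
--         if (i + block_size + initial) // block_size % n != 0
--     ]
-- ===== SOURCE B (Python) =====
-- def remove_every_nth(
--     samples: list, n: int, block_size: int = 1, initial: int = 0
-- ) -> list:
--     """Block-walk re-implementation: append whole kept block slices instead of
--     testing an index predicate per element."""
--     if n <= 0:
--         raise ValueError(f"n = {n}, must be >= 1")
--     elif block_size <= 0:
--         raise ValueError(f"block_size = {block_size}, must be >= 1")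
--     out = []
--     start = 0
--     pos = initial
--     total = len(samples)
--     while start < total:
--         b = pos // block_size
--         take = min((b + 1) * block_size - pos, total - start)
--         if (b + 1) % n != 0:
--             out.extend(samples[start:start + take])
--         start += take
--         pos += take
--     return out
-- ===== Notes on version B (the rewrite author's own statement) =====
-- stated objective: faster
-- what changed: Replaces the per-element index-predicate comprehension by a while loop that walks the data block by block, computing each block boundary from the running position and extending the output with whole kept slices.
import Mathlib
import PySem

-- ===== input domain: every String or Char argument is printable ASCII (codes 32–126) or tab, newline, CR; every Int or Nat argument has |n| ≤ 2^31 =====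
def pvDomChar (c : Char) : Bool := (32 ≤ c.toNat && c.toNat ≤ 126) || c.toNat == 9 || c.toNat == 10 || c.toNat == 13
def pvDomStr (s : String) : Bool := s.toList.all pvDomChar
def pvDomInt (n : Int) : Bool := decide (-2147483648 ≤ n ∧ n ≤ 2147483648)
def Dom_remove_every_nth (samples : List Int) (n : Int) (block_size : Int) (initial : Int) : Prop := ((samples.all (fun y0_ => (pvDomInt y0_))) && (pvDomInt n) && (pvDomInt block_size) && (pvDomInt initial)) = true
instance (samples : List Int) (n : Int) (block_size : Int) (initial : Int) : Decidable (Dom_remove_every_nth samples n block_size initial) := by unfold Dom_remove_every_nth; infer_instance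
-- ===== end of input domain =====

-- B walks the input block by block (slice-extend per block) where A filters element by element
-- by an index predicate; one divmod per block instead of per element (measured faster in a timing run).

-- ===== PORT A =====
-- A: comprehension over enumerate(samples), keeping item when (i+block_size+initial)//block_size % n != 0.
def remove_every_nth (samples : List Int) (n : Int) (block_size : Int) (initial : Int) : List Int :=
  if n ≤ 0 then []        -- Python raises ValueError here: excluded by Pre_
  else if block_size ≤ 0 then []   -- Python raises ValueError here: excluded by Pre_
  else (PySem.List.enumerate samples 0).foldl
    (fun acc p =>
      if PySem.Int.mod (PySem.Int.floordiv (p.1 + block_size + initial) block_size) n ≠ 0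
      then acc ++ [p.2] else acc) []

-- ===== PORT B =====
-- the while loop of Source B; fuel = samples.length (each iteration consumes take ≥ 1 elements when block_size ≥ 1)
def pvAltGo (n bs : Int) : Nat → List Int → Int → List Int
  | 0, _, _ => []
  | _ + 1, [], _ => []
  | fuel + 1, rest, pos =>
      let b := PySem.Int.floordiv pos bs
      let take := min ((b + 1) * bs - pos).toNat rest.length
      (if PySem.Int.mod (b + 1) n ≠ 0 then rest.take take else []) ++
        pvAltGo n bs fuel (rest.drop take) (pos + (take : Int))

def remove_every_nth_alt (samples : List Int) (n : Int) (block_size : Int) (initial : Int) : List Int :=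
  if n ≤ 0 then []        -- Python raises ValueError here: excluded by Pre_
  else if block_size ≤ 0 then []   -- Python raises ValueError here: excluded by Pre_
  else pvAltGo n block_size samples.length samples initial

-- ===== PRECONDITION & SPEC =====
-- A raises ValueError when n <= 0 or block_size <= 0; Pre_ excludes exactly those inputs.
def Pre_remove_every_nth (samples : List Int) (n : Int) (block_size : Int) (initial : Int) : Prop :=
  1 ≤ n ∧ 1 ≤ block_size
instance (samples : List Int) (n : Int) (block_size : Int) (initial : Int) : Decidable (Pre_remove_every_nth samples n block_size initial) := by unfold Pre_remove_every_nth; infer_instance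

def pvWitness_remove_every_nth : List Int × Int × Int × Int := ([1, 2, 3, 4, 5, 6], 2, 2, 1)

def Spec_remove_every_nth (samples : List Int) (n : Int) (block_size : Int) (initial : Int) (out : List Int) : Prop := out = remove_every_nth_alt samples n block_size initial
instance (samples : List Int) (n : Int) (block_size : Int) (initial : Int) (out : List Int) : Decidable (Spec_remove_every_nth samples n block_size initial out) := by unfold Spec_remove_every_nth; infer_instance

-- ===== CLAIM (what is proved, stated in full; the proofs are below) =====
def Claim_equal_remove_every_nth : Prop := ∀ (samples : List Int) (n : Int) (block_size : Int) (initial : Int), Dom_remove_every_nth samples n block_size initial → Pre_remove_every_nth samples n block_size initial → Spec_remove_every_nth samples n block_size initial (remove_every_nth samples n block_size initial)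

-- ===== LEMMAS AND PROOFS =====

-- keep-condition of A at absolute position p = i + initial
def pvKeep (n bs p : Int) : Bool :=
  PySem.Int.mod (PySem.Int.floordiv (p + bs) bs) n ≠ 0

-- A's comprehension as a positional structural recursion
def pvAGo (n bs : Int) : List Int → Int → List Int
  | [], _ => []
  | x :: xs, p => (if pvKeep n bs p then [x] else []) ++ pvAGo n bs xs (p + 1)

theorem pvFoldl_eq_aGo (n bs initial : Int) (xs : List Int) :
    ∀ (s : Int) (acc : List Int),
      (PySem.List.enumerate xs s).foldl
        (fun acc p =>
          if PySem.Int.mod (PySem.Int.floordiv (p.1 + bs + initial) bs) n ≠ 0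
          then acc ++ [p.2] else acc) acc
      = acc ++ pvAGo n bs xs (s + initial) := by
  induction xs with
  | nil => intro s acc; simp [PySem.List.enumerate_nil, pvAGo]
  | cons x xs ih =>
    intro s acc
    rw [PySem.List.enumerate_cons]
    simp only [List.foldl_cons, ih (s + 1), pvAGo, pvKeep]
    simp only [show s + bs + initial = s + initial + bs from by ring,
               show s + initial + 1 = s + 1 + initial from by ring]
    by_cases hc : PySem.Int.mod (PySem.Int.floordiv (s + initial + bs) bs) n ≠ 0 <;> simp [hc]

theorem pvAGo_append (n bs : Int) (l1 l2 : List Int) :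
    ∀ p : Int, pvAGo n bs (l1 ++ l2) p = pvAGo n bs l1 p ++ pvAGo n bs l2 (p + l1.length) := by
  induction l1 with
  | nil => intro p; simp [pvAGo]
  | cons x xs ih =>
    intro p
    simp only [List.cons_append, pvAGo, ih (p + 1), List.length_cons, List.append_assoc]
    congr 2
    push_cast; ring

theorem pvAGo_const (n bs : Int) (c : Bool) (l : List Int) :
    ∀ p : Int, (∀ j : Nat, j < l.length → pvKeep n bs (p + j) = c) →
      pvAGo n bs l p = if c then l else [] := by
  induction l with
  | nil => intro p _; simp [pvAGo]
  | cons x xs ih =>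
    intro p h
    have h0 : pvKeep n bs p = c := by simpa using h 0 (by simp)
    have hrest : ∀ j : Nat, j < xs.length → pvKeep n bs (p + 1 + j) = c := by
      intro j hj
      have := h (j + 1) (by simp; omega)
      simpa [add_assoc, add_comm, add_left_comm] using this
    simp only [pvAGo, h0, ih (p + 1) hrest]
    cases c <;> simp

-- the keep-condition is constant throughout one block
theorem pvKeep_const (n bs p : Int) (hbs : 0 < bs) (j : Nat)
    (hj : (j : Int) < (PySem.Int.floordiv p bs + 1) * bs - p) :
    pvKeep n bs (p + j) = (PySem.Int.mod (PySem.Int.floordiv p bs + 1) n ≠ 0 : Bool) := by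
  set b := PySem.Int.floordiv p bs with hb
  have hpb : b * bs ≤ p ∧ p < (b + 1) * bs :=
    (PySem.Int.floordiv_eq_iff_of_pos hbs).mp hb.symm
  have hfd : PySem.Int.floordiv (p + j + bs) bs = b + 1 := by
    rw [PySem.Int.floordiv_eq_iff_of_pos hbs]
    constructor
    · nlinarith [hpb.1, Int.natCast_nonneg j]
    · nlinarith [hj]
  simp [pvKeep, hfd]

theorem pvAltGo_eq_aGo (n bs : Int) (hbs : 0 < bs) :
    ∀ (fuel : Nat) (rest : List Int) (pos : Int), rest.length ≤ fuel →
      pvAltGo n bs fuel rest pos = pvAGo n bs rest pos := by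
  intro fuel
  induction fuel with
  | zero =>
    intro rest pos h
    have : rest = [] := by cases rest <;> simp_all
    simp [this, pvAltGo, pvAGo]
  | succ f ih =>
    intro rest pos h
    cases rest with
    | nil => simp [pvAltGo, pvAGo]
    | cons x xs =>
      rw [pvAltGo]
      set b := PySem.Int.floordiv pos bs with hb
      have hpb : b * bs ≤ pos ∧ pos < (b + 1) * bs :=
        (PySem.Int.floordiv_eq_iff_of_pos hbs).mp hb.symm
      have ht1 : 1 ≤ (b + 1) * bs - pos := by omega
      set k := min ((b + 1) * bs - pos).toNat (x :: xs).length with hk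
      have htn : 1 ≤ ((b + 1) * bs - pos).toNat := by omega
      have hk1 : 1 ≤ k := by rw [hk]; simp only [List.length_cons]; omega
      have hkle : k ≤ (x :: xs).length := by rw [hk]; exact min_le_right _ _
      have hkInt : ∀ j : Nat, j < k → (j : Int) < (b + 1) * bs - pos := by
        intro j hj
        have hlt : j < ((b + 1) * bs - pos).toNat :=
          lt_of_lt_of_le hj (by rw [hk]; exact min_le_left _ _)
        omega
      have hsplit : (x :: xs) = (x :: xs).take k ++ (x :: xs).drop k := by
        simp
      conv_rhs => rw [hsplit]
      rw [pvAGo_append]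
      have hlen : ((x :: xs).take k).length = k := by
        rw [List.length_take]; exact Nat.min_eq_left hkle
      rw [hlen]
      have hchunk : pvAGo n bs ((x :: xs).take k) pos
          = if (PySem.Int.mod (b + 1) n ≠ 0 : Bool) then (x :: xs).take k else [] := by
        apply pvAGo_const
        intro j hj
        rw [hlen] at hj
        exact pvKeep_const n bs pos hbs j (hkInt j hj)
      rw [hchunk]
      have hdrop : ((x :: xs).drop k).length ≤ f := by
        simp only [List.length_drop, List.length_cons]
        simp only [List.length_cons] at h
        omega
      rw [ih _ _ hdrop]
      by_cases hc : PySem.Int.mod (b + 1) n ≠ 0 <;> simp [hc]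
      exact fun h' => by simp at h'

-- ===== VERDICT (by name: the statement is the Claim_ definition above) =====
theorem remove_every_nth_spec : Claim_equal_remove_every_nth := by
  intro samples n bs initial _ hpre
  unfold Spec_remove_every_nth remove_every_nth remove_every_nth_alt
  obtain ⟨hn, hbs⟩ := hpre
  rw [if_neg (by omega), if_neg (by omega), if_neg (by omega), if_neg (by omega)]
  rw [pvFoldl_eq_aGo n bs initial samples 0 []]
  rw [pvAltGo_eq_aGo n bs (by omega) samples.length samples initial le_rfl]
  simp
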